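-- pv_equiv track=rewrite | github.com/daeunjeong520/python_algorithm | algorithm/programmers/level0/army_of_ants.py | solution
-- ===== SOURCE A (Python) =====
-- def solution(hp):
--     attack = [5, 3, 1]
--     ant_cnt = 0
--     i = 0
--
--     while hp >= 0:
--         if(i == len(attack)):
--             break
--         ant_cnt += hp // attack[i]
--         hp = hp % attack[i]
--         i += 1
--
--     return ant_cnt
-- ===== SOURCE B (Python) =====
-- def solution(hp):
--     if hp < 0:
--         return 0
--     fives = hp // 5
--     rem = hp % 5
--     return fives + rem // 3 + rem % 3
-- ===== Notes on version B (the rewrite author's own statement) =====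
-- stated objective: simpler
-- what changed: Replaced the while-loop with its index counter and mutable state by a direct closed-form arithmetic expression: floor-divide by the largest attack, then by the next on the remainder, plus the final remainder, with a guard returning zero on negative hp.
import Mathlib
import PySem

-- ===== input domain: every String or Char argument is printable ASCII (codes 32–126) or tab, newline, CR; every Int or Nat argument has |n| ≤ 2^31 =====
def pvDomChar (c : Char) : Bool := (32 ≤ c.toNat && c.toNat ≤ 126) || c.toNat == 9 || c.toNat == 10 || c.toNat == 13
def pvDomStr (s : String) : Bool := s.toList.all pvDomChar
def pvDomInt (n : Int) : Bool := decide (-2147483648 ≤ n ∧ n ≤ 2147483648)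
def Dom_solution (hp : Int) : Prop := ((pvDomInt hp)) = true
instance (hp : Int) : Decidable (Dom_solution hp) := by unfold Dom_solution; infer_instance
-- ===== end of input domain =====

-- B replaces A's greedy while-loop (mutable counter and index) by the closed-form
-- arithmetic hp//5 + (hp%5)//3 + (hp%5)%3 with a hp<0 guard; objective: simpler.

-- ===== PORT A =====
-- A's while-loop: guard hp >= 0 first, then break when i == len(attack) (= empty suffix),
-- else ant_cnt += hp // attack[i]; hp = hp % attack[i]; i += 1 (= step to the tail).
def solutionLoop (attack : List Int) (hp ant_cnt : Int) : Int :=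
  if hp ≥ 0 then
    match attack with
    | [] => ant_cnt
    | a :: rest => solutionLoop rest (PySem.Int.mod hp a) (ant_cnt + PySem.Int.floordiv hp a)
  else ant_cnt

def solution (hp : Int) : Int := solutionLoop [5, 3, 1] hp 0

-- ===== PORT B =====
def solution_alt (hp : Int) : Int :=
  if hp < 0 then 0
  else
    let fives := PySem.Int.floordiv hp 5
    let rem := PySem.Int.mod hp 5
    fives + PySem.Int.floordiv rem 3 + PySem.Int.mod rem 3

-- ===== PRECONDITION & SPEC =====
def Spec_solution (hp : Int) (out : Int) : Prop := out = solution_alt hp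
instance (hp : Int) (out : Int) : Decidable (Spec_solution hp out) := by unfold Spec_solution; infer_instance

-- ===== CLAIM (what is proved, stated in full; the proofs are below) =====
def Claim_equal_solution : Prop := ∀ (hp : Int), Dom_solution hp → Spec_solution hp (solution hp)

-- ===== LEMMAS AND PROOFS =====

-- ===== VERDICT (by name: the statement is the Claim_ definition above) =====
theorem solution_spec : Claim_equal_solution := by
  intro hp _
  show solution hp = solution_alt hp
  by_cases h : hp ≥ 0
  · have h5 : (0:Int) ≤ PySem.Int.mod hp 5 := PySem.Int.mod_nonneg hp (by norm_num)
    have h3 : (0:Int) ≤ PySem.Int.mod (PySem.Int.mod hp 5) 3 :=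
      PySem.Int.mod_nonneg _ (by norm_num)
    have h1 : (0:Int) ≤ PySem.Int.mod (PySem.Int.mod (PySem.Int.mod hp 5) 3) 1 :=
      PySem.Int.mod_nonneg _ (by norm_num)
    simp only [solution, solutionLoop, h, h5, h3, h1, if_pos]
    simp only [solution_alt, if_neg (not_lt.mpr h)]
    have d1 : PySem.Int.floordiv (PySem.Int.mod (PySem.Int.mod hp 5) 3) 1
        = PySem.Int.mod (PySem.Int.mod hp 5) 3 := by
      rw [PySem.Int.floordiv_eq_ediv_of_pos (by norm_num)]; simp
    rw [d1]; ring
  · simp [solution, solutionLoop, h, solution_alt, show hp < 0 by omega]
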